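-- pv_equiv track=rewrite | github.com/MBZUAI-Paris/dialogforge | src/dlgforge/io/output.py | _max_difficulty
-- ===== SOURCE A (Python) =====
-- from typing import Any, Dict, List, Optional
--
-- def _max_difficulty(difficulties: List[str]) -> str:
--     ranking = {"easy": 1, "medium": 2, "hard": 3}
--     best = ""
--     best_score = 0
--     for diff in difficulties:
--         score = ranking.get(diff, 0)
--         if score > best_score:
--             best_score = score
--             best = diff
--     return best
-- ===== SOURCE B (Python) =====
-- def _max_difficulty(difficulties):
--     for level in ("hard", "medium", "easy"):
--         if level in difficulties:
--             return level
--     return ""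
-- ===== Notes on version B (the rewrite author's own statement) =====
-- stated objective: idiomatic
-- what changed: Instead of an argmax scan maintaining a running best and best_score, B probes the three fixed levels in descending priority and returns the first one present in the list.
import Mathlib
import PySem

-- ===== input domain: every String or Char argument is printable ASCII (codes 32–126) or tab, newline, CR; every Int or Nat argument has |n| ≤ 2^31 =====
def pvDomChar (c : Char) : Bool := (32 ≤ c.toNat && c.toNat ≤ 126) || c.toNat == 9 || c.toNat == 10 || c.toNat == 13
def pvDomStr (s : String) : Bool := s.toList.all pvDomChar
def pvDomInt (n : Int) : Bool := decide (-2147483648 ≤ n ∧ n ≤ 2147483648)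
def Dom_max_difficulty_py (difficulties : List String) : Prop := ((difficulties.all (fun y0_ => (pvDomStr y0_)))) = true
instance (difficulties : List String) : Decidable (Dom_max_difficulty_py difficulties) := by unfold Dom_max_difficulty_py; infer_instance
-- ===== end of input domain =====

-- B replaces A's running-best argmax scan by probing the three fixed levels in descending priority; objective: idiomatic.

-- ===== PORT A =====
def pvRanking : PySem.Dict String Int :=
  PySem.Dict.ofList [("easy", 1), ("medium", 2), ("hard", 3)]

-- loop body of A: st = (best, best_score)
def pvStep (st : String × Int) (diff : String) : String × Int :=
  let score := pvRanking.getD diff 0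
  if score > st.2 then (diff, score) else st

def max_difficulty_py (difficulties : List String) : String :=
  (difficulties.foldl pvStep ("", 0)).1

-- ===== PORT B =====
def max_difficulty_py_alt (difficulties : List String) : String :=
  if difficulties.contains "hard" then "hard"
  else if difficulties.contains "medium" then "medium"
  else if difficulties.contains "easy" then "easy"
  else ""

-- ===== PRECONDITION & SPEC =====
def Spec_max_difficulty_py (difficulties : List String) (out : String) : Prop := out = max_difficulty_py_alt difficulties
instance (difficulties : List String) (out : String) : Decidable (Spec_max_difficulty_py difficulties out) := by unfold Spec_max_difficulty_py; infer_instance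

-- ===== CLAIM (what is proved, stated in full; the proofs are below) =====
def Claim_equal_max_difficulty_py : Prop := ∀ (difficulties : List String), Dom_max_difficulty_py difficulties → Spec_max_difficulty_py difficulties (max_difficulty_py difficulties)

-- ===== LEMMAS AND PROOFS =====

-- the literal dict looked up: ranking.get(diff, 0)
theorem pvRank_eq (d : String) :
    pvRanking.getD d 0 =
      if d = "hard" then 3 else if d = "medium" then 2 else if d = "easy" then 1 else 0 := by
  simp [pvRanking, PySem.Dict.ofList, PySem.Dict.update, PySem.Dict.getD_insert,
    PySem.Dict.getD_empty]

-- invariant of A's loop: the final best is the highest-priority level present that beats the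
-- incoming best_score, else the incoming best
set_option maxHeartbeats 1600000 in
theorem pv_loop_char (l : List String) : ∀ (st : String × Int), 0 ≤ st.2 →
    (l.foldl pvStep st).1 =
      if st.2 < 3 ∧ l.contains "hard" then "hard"
      else if st.2 < 2 ∧ l.contains "medium" then "medium"
      else if st.2 < 1 ∧ l.contains "easy" then "easy"
      else st.1 := by
  induction l with
  | nil => simp
  | cons d l ih =>
    intro st hst
    have h2 : 0 ≤ (pvStep st d).2 := by
      simp only [pvStep, pvRank_eq]
      split_ifs <;> omega
    simp only [List.foldl_cons, List.contains_cons]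
    rw [ih _ h2]
    clear ih h2
    simp only [pvStep, pvRank_eq]
    by_cases h1 : d = "hard" <;> by_cases h2 : d = "medium" <;> by_cases h3 : d = "easy" <;>
      simp only [h1, h2, h3, if_true, if_false, Bool.or_eq_true, beq_iff_eq] <;>
      split_ifs <;> simp_all <;> omega

-- ===== VERDICT (by name: the statement is the Claim_ definition above) =====
theorem max_difficulty_py_spec : Claim_equal_max_difficulty_py := by
  intro difficulties _
  unfold Spec_max_difficulty_py max_difficulty_py max_difficulty_py_alt
  rw [pv_loop_char _ _ (by norm_num)]
  split_ifs <;> simp_all
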